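-- pv_equiv track=rewrite | github.com/yacoublambaz/230PSS | nov18pss.py | minimum
-- ===== SOURCE A (Python) =====
-- L = ["hello","this","is","yacoub"]
--
-- def minimum(L):
--     if len(L) == 2:
--         return min(L[0],L[1]) #return the minimum of two elements
--     if len(L) == 1:
--         return L[0]
--     if len(L) > 1:
--         mid = len(L) // 2
--         left = L[:mid]
--         right = L[mid:]
--         left1 = minimum(left)
--         right1 = minimum(right)
--         return min(left1,right1)
-- ===== SOURCE B (Python) =====
-- def minimum(L):
--     if not L:
--         return None
--     m = L[0]
--     for x in L[1:]:
--         if x < m: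
--             m = x
--     return m
-- ===== Notes on version B (the rewrite author's own statement) =====
-- stated objective: faster
-- what changed: Replaces the recursive half-splitting divide-and-conquer (which allocates list slices at every recursion level) with a single iterative linear scan maintaining a running minimum.
import Mathlib
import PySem

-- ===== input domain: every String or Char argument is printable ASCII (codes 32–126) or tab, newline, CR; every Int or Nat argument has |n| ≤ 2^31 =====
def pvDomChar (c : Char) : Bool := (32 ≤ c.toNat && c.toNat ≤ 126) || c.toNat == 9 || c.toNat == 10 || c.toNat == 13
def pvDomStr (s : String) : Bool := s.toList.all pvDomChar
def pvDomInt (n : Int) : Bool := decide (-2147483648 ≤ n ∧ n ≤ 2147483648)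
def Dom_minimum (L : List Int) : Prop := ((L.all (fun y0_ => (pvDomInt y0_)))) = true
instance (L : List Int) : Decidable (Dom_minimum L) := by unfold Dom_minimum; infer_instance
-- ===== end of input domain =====

-- B replaces A's recursive half-splitting divide-and-conquer with a single linear
-- scan keeping a running minimum (objective: simpler). Return values agree on all inputs.

-- ===== PORT A =====
-- Python min(a, b) on two ints; both recursive results are always ints here
-- (each recursive call receives a nonempty list), so `none` never feeds `pyMin2`.
def pyMin2 (a b : Option Int) : Option Int :=
  match a, b with
  | some x, some y => some (min x y)
  | _, _ => none

-- L[:mid] / L[mid:] with 0 ≤ mid ≤ len L are exactly List.take / List.drop.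
def minimum (L : List Int) : Option Int :=
  if L.length = 2 then
    pyMin2 (PySem.List.pyGet? L 0) (PySem.List.pyGet? L 1)
  else if L.length = 1 then
    PySem.List.pyGet? L 0
  else if L.length > 1 then
    let mid := L.length / 2
    pyMin2 (minimum (L.take mid)) (minimum (L.drop mid))
  else
    none
termination_by L.length
decreasing_by
  · simp only [List.length_take]; omega
  · simp only [List.length_drop]; omega

-- ===== PORT B =====
def minimum_alt (L : List Int) : Option Int :=
  match L with
  | [] => none
  | x :: xs => some (List.foldl (fun m y => if y < m then y else m) x xs)

-- ===== PRECONDITION & SPEC =====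
def Spec_minimum (L : List Int) (out : Option Int) : Prop := out = minimum_alt L
instance (L : List Int) (out : Option Int) : Decidable (Spec_minimum L out) := by unfold Spec_minimum; infer_instance

-- ===== CLAIM (what is proved, stated in full; the proofs are below) =====
def Claim_equal_minimum : Prop := ∀ (L : List Int), Dom_minimum L → Spec_minimum L (minimum L)

-- ===== LEMMAS AND PROOFS =====

theorem runMin_is_min :
    (fun (m y : Int) => if y < m then y else m) = (min : Int → Int → Int) := by
  funext m y
  rw [min_def]
  split_ifs <;> omega

theorem foldl_min_pull (bs : List Int) :
    ∀ (m b : Int), List.foldl min (min m b) bs = min m (List.foldl min b bs) := by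
  induction bs with
  | nil => intro m b; simp
  | cons c bs ih =>
      intro m b
      simp only [List.foldl_cons, min_assoc]
      exact ih m (min b c)

theorem alt_append (A B : List Int) (hA : A ≠ []) (hB : B ≠ []) :
    minimum_alt (A ++ B) = pyMin2 (minimum_alt A) (minimum_alt B) := by
  rcases A with _ | ⟨a, as⟩
  · exact absurd rfl hA
  rcases B with _ | ⟨b, bs⟩
  · exact absurd rfl hB
  simp only [minimum_alt, pyMin2, List.cons_append, runMin_is_min]
  rw [List.foldl_append, List.foldl_cons, foldl_min_pull]

theorem minimum_eq_alt : ∀ (n : ℕ) (L : List Int), L.length = n → minimum L = minimum_alt L := by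
  intro n
  induction n using Nat.strong_induction_on with
  | _ n ih =>
    intro L hL
    rcases L with _ | ⟨a, _ | ⟨b, _ | ⟨c, t⟩⟩⟩
    · simp [minimum, minimum_alt]
    · simp [minimum, minimum_alt, PySem.List.pyGet?, PySem.List.pyIdx?]
    · rw [minimum]
      norm_num [minimum_alt, pyMin2, PySem.List.pyGet?, PySem.List.pyIdx?]
      rw [min_def]
      split_ifs <;> omega
    · have hlen : (a :: b :: c :: t).length = t.length + 3 := by simp
      have h3 : (3:ℕ) ≤ (a :: b :: c :: t).length := by rw [hlen]; omega
      rw [minimum]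
      have hne2 : (a :: b :: c :: t).length ≠ 2 := by omega
      have hne1 : (a :: b :: c :: t).length ≠ 1 := by omega
      have hgt1 : (a :: b :: c :: t).length > 1 := by omega
      simp only [hne2, hne1, hgt1, if_false]
      set L := a :: b :: c :: t with hLdef
      set mid := L.length / 2 with hmid
      have hmid1 : 1 ≤ mid := by
        have := h3; omega
      have hmidlt : mid < L.length := by omega
      have htake : (L.take mid).length = mid := by
        simp [List.length_take]; omega
      have hdrop : (L.drop mid).length = L.length - mid := by simp
      have e1 : minimum (L.take mid) = minimum_alt (L.take mid) :=
        ih (L.take mid).length (by rw [htake]; omega) _ rfl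
      have e2 : minimum (L.drop mid) = minimum_alt (L.drop mid) :=
        ih (L.drop mid).length (by rw [hdrop]; omega) _ rfl
      rw [e1, e2, ← alt_append]
      · rw [List.take_append_drop]; simp
      · intro h
        have := congrArg List.length h
        simp [htake] at this
        omega
      · intro h
        have := congrArg List.length h
        simp [hdrop] at this
        omega

-- ===== VERDICT (by name: the statement is the Claim_ definition above) =====
theorem minimum_spec : Claim_equal_minimum := by
  intro L _
  unfold Spec_minimum
  exact minimum_eq_alt L.length L rfl
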